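-- pv_equiv track=rewrite | github.com/noblejim/MACRO-DATA | scripts/analyze_focus_events.py | event_to_focus
-- ===== SOURCE A (Python) =====
-- FOCUS_GROUPS = {
--     'CPI': lambda et: isinstance(et, str) and et.startswith('CPI'),
--     'PCE': lambda et: isinstance(et, str) and et.startswith('PCE'),
--     'NFP': lambda et: et == 'NFP',
--     'FOMC': lambda et: et == 'FOMC',
-- }
--
-- def event_to_focus(et: str):
--     for k, fn in FOCUS_GROUPS.items():
--         try:
--             if fn(et):
--                 return k
--         except Exception:
--             continue
--     return None
-- ===== SOURCE B (Python) =====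
-- PREFIX_FOCUS = {'CPI': 'CPI', 'PCE': 'PCE'}
-- EXACT_FOCUS = frozenset({'NFP', 'FOMC'})
--
-- def event_to_focus(et: str):
--     if isinstance(et, str):
--         g = PREFIX_FOCUS.get(et[:3])
--         if g is not None:
--             return g
--         if et in EXACT_FOCUS:
--             return et
--     return None
-- ===== Notes on version B (the rewrite author's own statement) =====
-- stated objective: alternative
-- what changed: Replaces A's sequential scan over a dict of predicate lambdas (with a dead try/except) by table lookups: one dict lookup of the 3-character prefix et[:3] in a prefix-to-group map, then a frozenset membership test for the exact names NFP/FOMC.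
import Mathlib
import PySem

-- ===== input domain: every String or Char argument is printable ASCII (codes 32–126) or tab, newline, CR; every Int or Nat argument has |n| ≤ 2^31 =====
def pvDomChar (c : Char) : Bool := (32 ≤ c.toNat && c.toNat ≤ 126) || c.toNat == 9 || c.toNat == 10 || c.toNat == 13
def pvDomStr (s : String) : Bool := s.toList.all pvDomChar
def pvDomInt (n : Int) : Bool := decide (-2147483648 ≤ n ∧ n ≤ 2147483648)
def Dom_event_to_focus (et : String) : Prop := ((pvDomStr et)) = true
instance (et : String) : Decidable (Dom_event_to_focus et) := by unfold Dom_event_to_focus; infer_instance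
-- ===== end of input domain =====

-- B replaces A's sequential scan over a dict of predicate lambdas by table lookups:
-- one hash lookup of the 3-char prefix in a prefix→group dict, then a membership
-- test in a frozenset of exact names (objective: alternative/idiomatic).

-- ===== PORT A =====
-- FOCUS_GROUPS as an association list of (key, predicate) in insertion order;
-- the try/except in A is dead code (these predicates never raise on a str).
def FOCUS_GROUPS : List (String × (String → Bool)) :=
  [("CPI", fun et => PySem.Str.startswith et "CPI"),
   ("PCE", fun et => PySem.Str.startswith et "PCE"),
   ("NFP", fun et => et == "NFP"),
   ("FOMC", fun et => et == "FOMC")]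

-- A's for-loop with early return, as recursion over the items list
def event_to_focus_loop (et : String) : List (String × (String → Bool)) → Option String
  | [] => none
  | kf :: rest => if kf.2 et then some kf.1 else event_to_focus_loop et rest

def event_to_focus (et : String) : Option String :=
  event_to_focus_loop et FOCUS_GROUPS

-- ===== PORT B =====
def PREFIX_FOCUS : PySem.Dict String String :=
  PySem.Dict.ofList [("CPI", "CPI"), ("PCE", "PCE")]
def EXACT_FOCUS : PySem.Set String := PySem.Set.ofList ["NFP", "FOMC"]

def event_to_focus_alt (et : String) : Option String :=
  -- g = PREFIX_FOCUS.get(et[:3]); if g is not None: return g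
  match PySem.Dict.get? PREFIX_FOCUS (PySem.Str.slice et none (some 3)) with
  | some g => some g
  | none => if PySem.Set.contains EXACT_FOCUS et then some et else none

-- ===== PRECONDITION & SPEC =====
def Spec_event_to_focus (et : String) (out : Option String) : Prop := out = event_to_focus_alt et
instance (et : String) (out : Option String) : Decidable (Spec_event_to_focus et out) := by unfold Spec_event_to_focus; infer_instance

-- ===== CLAIM (what is proved, stated in full; the proofs are below) =====
def Claim_equal_event_to_focus : Prop := ∀ (et : String), Dom_event_to_focus et → Spec_event_to_focus et (event_to_focus et)

-- ===== LEMMAS AND PROOFS =====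

-- startswith by a 3-char prefix ↔ the first three characters equal it
theorem startswith3_iff (cs p : List Char) (hp : p.length = 3) :
    PySem.Chars.startswith cs p = true ↔ cs.take 3 = p := by
  rw [PySem.Chars.startswith, List.isPrefixOf_iff_prefix, List.prefix_iff_eq_take, hp]
  exact eq_comm

-- the slice et[:3] is the string of the first three characters
theorem slice3_toList (et : String) :
    (PySem.Str.slice et none (some 3)).toList = et.toList.take 3 := by
  simp only [PySem.Str.slice, String.toList_ofList]
  have := PySem.List.slice_to (xs := et.toList) (b := 3) (by norm_num)
  simpa using this

-- ===== VERDICT (by name: the statement is the Claim_ definition above) =====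
theorem event_to_focus_spec : Claim_equal_event_to_focus := by
  intro et _
  unfold Spec_event_to_focus event_to_focus event_to_focus_alt FOCUS_GROUPS
  have hsl : ∀ (q : String), (PySem.Str.slice et none (some 3) = q) ↔ et.toList.take 3 = q.toList := by
    intro q
    rw [← String.toList_inj, slice3_toList]
  have hP : PREFIX_FOCUS.items = [("CPI", "CPI"), ("PCE", "PCE")] := rfl
  have hEF : (EXACT_FOCUS : List String) = ["NFP", "FOMC"] := rfl
  by_cases h1 : et.toList.take 3 = ['C','P','I']
  · have hc1 : PySem.Chars.startswith et.toList ['C','P','I'] = true :=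
      (startswith3_iff et.toList ['C','P','I'] rfl).mpr h1
    have hs : PySem.Str.slice et none (some 3) = "CPI" := (hsl "CPI").mpr (by simpa using h1)
    simp [event_to_focus_loop, PySem.Str.startswith, hc1, PySem.Dict.get?, hP, hs]
  · have hc1 : PySem.Chars.startswith et.toList ['C','P','I'] = false := by
      simp only [Bool.eq_false_iff, ne_eq, startswith3_iff et.toList ['C','P','I'] rfl]
      exact h1
    by_cases h2 : et.toList.take 3 = ['P','C','E']
    · have hc2 : PySem.Chars.startswith et.toList ['P','C','E'] = true :=
        (startswith3_iff et.toList ['P','C','E'] rfl).mpr h2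
      have hs : PySem.Str.slice et none (some 3) = "PCE" := (hsl "PCE").mpr (by simpa using h2)
      simp [event_to_focus_loop, PySem.Str.startswith, hc1, hc2, PySem.Dict.get?, hP,
        List.find?, hs]
    · have hc2 : PySem.Chars.startswith et.toList ['P','C','E'] = false := by
        simp only [Bool.eq_false_iff, ne_eq, startswith3_iff et.toList ['P','C','E'] rfl]
        exact h2
      have e1 : (PySem.Str.slice et none (some 3) == "CPI") = false := by
        simp only [beq_eq_false_iff_ne, ne_eq, hsl]; simpa using h1
      have e2 : (PySem.Str.slice et none (some 3) == "PCE") = false := by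
        simp only [beq_eq_false_iff_ne, ne_eq, hsl]; simpa using h2
      have hd : PySem.Dict.get? PREFIX_FOCUS (PySem.Str.slice et none (some 3)) = none := by
        have e1' : (("CPI" : String) == PySem.Str.slice et none (some 3)) = false := by
          simpa [BEq.comm] using e1
        have e2' : (("PCE" : String) == PySem.Str.slice et none (some 3)) = false := by
          simpa [BEq.comm] using e2
        simp [PySem.Dict.get?, hP, List.find?, e1', e2']
      rw [hd]
      by_cases h3 : et = "NFP"
      · subst h3; decide
      · by_cases h4 : et = "FOMC"
        · subst h4; decide
        · simp [event_to_focus_loop, PySem.Str.startswith, hc1, hc2, h3, h4,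
            PySem.Set.contains, hEF]
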